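-- pv_equiv track=rewrite | github.com/bramstoeller/adventofcode | 2024/day19.py | fn_2c
-- ===== SOURCE A (Python) =====
-- def towel_tree(towels):
--     tree = {}
--     for t in towels:
--         node = tree
--         for i in range(len(t)):
--             c = ord(t[i])
--             if c not in node:
--                 node[c] = {}
--             node = node[c]
--         node[0] = {}
--     return tree
--
-- def in_tree(tree, word):
--     node = tree
--     for c in word:
--         if c not in node:
--             return False
--         node = node[c]
--     return 0 in node
--
-- def count_can_form_in_tree(word, tree):
--     if len(word) == 0:
--         return 1
--     matches = 0
--     for n in range(1, min(9, len(word) + 1)):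
--         if in_tree(tree, word[:n]):
--             matches += count_can_form_in_tree(word[n:], tree)
--     return matches
--
-- def fn_2c(towels, patterns):
--     matches = 0
--     towels = towel_tree(towels)
--     for i, p in enumerate(patterns):
--         p = [ord(c) for c in p]
--         n = count_can_form_in_tree(p, towels)
--         matches += n
--     return matches
-- ===== SOURCE B (Python) =====
-- def fn_2c(towels, patterns):
--     # Only prefixes of length <= 8 can ever match (A scans n in 1..8), so keep those towels.
--     ts = set(t for t in towels if len(t) <= 8)
--     total = 0
--     for p in patterns:
--         n = len(p)
--         dp = [0] * (n + 1)
--         dp[n] = 1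
--         for i in range(n - 1, -1, -1):
--             acc = 0
--             for k in range(1, min(8, n - i) + 1):
--                 if p[i:i + k] in ts:
--                     acc += dp[i + k]
--             dp[i] = acc
--         total += dp[0]
--     return total
-- ===== Notes on version B (the rewrite author's own statement) =====
-- stated objective: faster
-- what changed: Replaces the per-pattern exponential recursion over a towel trie by a single backward dynamic program over suffix start positions (dp[i] = ways to tile p[i:]), with the towels kept in a set (only lengths <= 8 can ever match, as in A).
import Mathlib
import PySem

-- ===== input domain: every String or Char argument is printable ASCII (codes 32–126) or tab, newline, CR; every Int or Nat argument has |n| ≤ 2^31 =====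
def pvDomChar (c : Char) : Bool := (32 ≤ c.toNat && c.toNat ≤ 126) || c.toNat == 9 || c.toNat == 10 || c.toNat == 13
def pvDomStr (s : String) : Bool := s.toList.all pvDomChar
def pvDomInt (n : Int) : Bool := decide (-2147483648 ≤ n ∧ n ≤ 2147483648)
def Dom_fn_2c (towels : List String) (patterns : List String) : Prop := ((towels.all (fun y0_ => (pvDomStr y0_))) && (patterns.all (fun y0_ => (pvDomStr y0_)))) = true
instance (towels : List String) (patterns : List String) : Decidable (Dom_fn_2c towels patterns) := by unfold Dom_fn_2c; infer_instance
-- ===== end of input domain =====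

-- B replaces A's per-pattern exponential recursion over the towel trie by a right-to-left
-- dynamic program over suffix start positions (suffix counts computed once each); equal results.

-- ===== PORT A =====
-- The Python trie is a dict of dicts (keys = char codes, terminal marker key 0);
-- ported as a mutual inductive (node + explicit child list) with dict get/set semantics.
mutual
inductive PvTrie where
  | mk : PvChildren → PvTrie
inductive PvChildren where
  | nil : PvChildren
  | cons : Int → PvTrie → PvChildren → PvChildren
end

def PvChildren.get : PvChildren → Int → Option PvTrie
  | .nil, _ => none
  | .cons k v r, c => if c = k then some v else r.get c

-- dict assignment node[c] = t: overwrite in place, new keys append at the end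
def PvChildren.set : PvChildren → Int → PvTrie → PvChildren
  | .nil, c, t => .cons c t .nil
  | .cons k v r, c, t => if c = k then .cons k t r else .cons k v (r.set c t)

def PvTrie.children : PvTrie → PvChildren
  | .mk ch => ch

def pvEmptyTrie : PvTrie := .mk .nil

-- one towel inserted along its path (the inner 'for i in range(len(t))' walk of towel_tree)
def pvInsert (tr : PvTrie) : List Int → PvTrie
  | [] => .mk (tr.children.set 0 pvEmptyTrie)
  | c :: cs =>
    .mk (tr.children.set c (pvInsert ((tr.children.get c).getD pvEmptyTrie) cs))

def pvCodes (s : String) : List Int := s.toList.map (fun c => (c.toNat : Int))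

def pvTowelTree (towels : List String) : PvTrie :=
  towels.foldl (fun tr t => pvInsert tr (pvCodes t)) pvEmptyTrie

def pvInTree (tr : PvTrie) : List Int → Bool
  | [] => (tr.children.get 0).isSome
  | c :: cs =>
    match tr.children.get c with
    | none => false
    | some ch => pvInTree ch cs

-- count_can_form_in_tree; the recursion is made structural on a fuel argument
-- (fuel = len(word) at the top call; each recursive call drops >= 1 element), and the
-- 'for n in range(1, min(9, len(word)+1))' loop with its 'matches' accumulator is a foldl
def pvCountF : Nat → PvTrie → List Int → Int
  | 0, _, word => if word.length = 0 then 1 else 0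
  | f + 1, tree, word =>
    if word.length = 0 then 1
    else
      (PySem.List.pyRange 1 (min 9 ((word.length : Int) + 1)) 1).foldl
        (fun mtc n =>
          if pvInTree tree (word.take n.toNat) then mtc + pvCountF f tree (word.drop n.toNat)
          else mtc) 0

def fn_2c (towels : List String) (patterns : List String) : Int :=
  let tree := pvTowelTree towels
  (PySem.List.enumerate patterns 0).foldl
    (fun mtc ip => mtc + pvCountF (pvCodes ip.2).length tree (pvCodes ip.2)) 0

-- ===== PORT B =====
-- Source B: ts = set of towels of length ≤ 8; per pattern a backward DP dp[i] = #ways for suffix i;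
-- the dp array is kept as the list of already computed suffix values (head = current dp[i]).
def pvDpB (ts : PySem.Set String) : List Char → List Int
  | [] => [1]
  | c :: rest =>
    ((PySem.List.pyRange 1 (min 8 (((c :: rest).length : Int)) + 1) 1).foldl
      (fun acc k =>
        if PySem.Set.contains ts (String.ofList ((c :: rest).take k.toNat))
        then acc + (pvDpB ts rest).getD (k.toNat - 1) 0 else acc) 0) :: pvDpB ts rest

def fn_2c_alt (towels : List String) (patterns : List String) : Int :=
  let ts := PySem.Set.ofList (towels.filter (fun t => decide (PySem.Str.len t ≤ 8)))
  patterns.foldl (fun total p => total + (pvDpB ts p.toList).headD 0) 0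

-- ===== PRECONDITION & SPEC =====
def Spec_fn_2c (towels : List String) (patterns : List String) (out : Int) : Prop := out = fn_2c_alt towels patterns
instance (towels : List String) (patterns : List String) (out : Int) : Decidable (Spec_fn_2c towels patterns out) := by unfold Spec_fn_2c; infer_instance

-- ===== CLAIM (what is proved, stated in full; the proofs are below) =====
def Claim_equal_fn_2c : Prop := ∀ (towels : List String) (patterns : List String), Dom_fn_2c towels patterns → Spec_fn_2c towels patterns (fn_2c towels patterns)

-- ===== LEMMAS AND PROOFS =====

-- definitional unfoldings of the trie operations (rfl)
lemma pvChildren_mk (ch : PvChildren) : (PvTrie.mk ch).children = ch := rfl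
lemma pvGet_nil (c : Int) : PvChildren.nil.get c = none := rfl
lemma pvGet_cons (k : Int) (v : PvTrie) (r : PvChildren) (c : Int) :
    (PvChildren.cons k v r).get c = if c = k then some v else r.get c := rfl
lemma pvSet_nil (c : Int) (t : PvTrie) : PvChildren.nil.set c t = .cons c t .nil := rfl
lemma pvSet_cons (k : Int) (v : PvTrie) (r : PvChildren) (c : Int) (t : PvTrie) :
    (PvChildren.cons k v r).set c t = if c = k then .cons k t r else .cons k v (r.set c t) := rfl
lemma pvInsert_nil (tr : PvTrie) : pvInsert tr [] = .mk (tr.children.set 0 pvEmptyTrie) := rfl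
lemma pvInsert_cons (tr : PvTrie) (c : Int) (cs : List Int) :
    pvInsert tr (c :: cs) = .mk (tr.children.set c (pvInsert ((tr.children.get c).getD pvEmptyTrie) cs)) := rfl
lemma pvInTree_nil (tr : PvTrie) : pvInTree tr [] = (tr.children.get 0).isSome := rfl
lemma pvInTree_cons (tr : PvTrie) (c : Int) (cs : List Int) :
    pvInTree tr (c :: cs) = (match tr.children.get c with | none => false | some ch => pvInTree ch cs) := rfl

lemma pvChildren_get_set : ∀ (ch : PvChildren) (c : Int) (t : PvTrie) (c' : Int),
    (ch.set c t).get c' = if c' = c then some t else ch.get c'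
  | .nil, c, t, c' => by simp [pvSet_nil, pvGet_nil, pvGet_cons]
  | .cons k v r, c, t, c' => by
    by_cases h : c = k
    · subst h
      rw [pvSet_cons, if_pos rfl, pvGet_cons, pvGet_cons]
      split_ifs <;> simp_all
    · rw [pvSet_cons, if_neg h, pvGet_cons, pvGet_cons, pvChildren_get_set r c t c']
      split_ifs <;> simp_all

lemma pvInTree_empty (w : List Int) : pvInTree pvEmptyTrie w = false := by
  cases w <;> simp [pvInTree_nil, pvInTree_cons, pvEmptyTrie, pvChildren_mk, pvGet_nil]

lemma pvInTree_insert (cs w : List Int) (tr : PvTrie)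
    (hcs : ∀ x ∈ cs, 0 < x) (hw : ∀ x ∈ w, 0 < x) :
    pvInTree (pvInsert tr cs) w = (decide (w = cs) || pvInTree tr w) := by
  induction cs generalizing tr w with
  | nil =>
    cases w with
    | nil => simp [pvInsert_nil, pvInTree_nil, pvChildren_mk, pvChildren_get_set]
    | cons c ws =>
      have hc : c ≠ 0 := by have := hw c (by simp); omega
      simp [pvInsert_nil, pvInTree_cons, pvChildren_mk, pvChildren_get_set, hc]
  | cons d ds ih =>
    have hd : d ≠ 0 := by have := hcs d (by simp); omega
    cases w with
    | nil =>
      simp [pvInsert_cons, pvInTree_nil, pvChildren_mk, pvChildren_get_set, Ne.symm hd]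
    | cons c ws =>
      by_cases hcd : c = d
      · subst hcd
        have hih := ih ws ((tr.children.get c).getD pvEmptyTrie)
          (fun x hx => hcs x (by simp [hx])) (fun x hx => hw x (by simp [hx]))
        simp only [pvInsert_cons, pvInTree_cons, pvChildren_mk, pvChildren_get_set,
          if_true]
        rw [hih]
        cases hg : tr.children.get c with
        | none => simp [pvInTree_empty]
        | some chld => simp
      · simp only [pvInsert_cons, pvInTree_cons, pvChildren_mk, pvChildren_get_set, if_neg hcd]
        have hne : (c :: ws = d :: ds) = False := by simp [hcd]
        simp [hne]

lemma pvInTree_towelTree (towels : List String) (w : List Int)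
    (htow : ∀ t ∈ towels, ∀ x ∈ pvCodes t, 0 < x) (hw : ∀ x ∈ w, 0 < x) :
    pvInTree (pvTowelTree towels) w = decide (w ∈ towels.map pvCodes) := by
  suffices h : ∀ (tr : PvTrie),
      pvInTree (towels.foldl (fun tr t => pvInsert tr (pvCodes t)) tr) w
        = (decide (w ∈ towels.map pvCodes) || pvInTree tr w) by
    simpa [pvTowelTree, pvInTree_empty] using h pvEmptyTrie
  induction towels with
  | nil => simp
  | cons t rest ih =>
    intro tr
    simp only [List.foldl_cons]
    rw [ih (fun t' ht' => htow t' (by simp [ht'])),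
        pvInTree_insert _ _ _ (htow t (by simp)) hw]
    simp only [List.map_cons, List.mem_cons]
    by_cases h1 : w = pvCodes t <;> by_cases h2 : w ∈ rest.map pvCodes <;>
      simp [h1, h2]

-- closed-form sum over a Nat interval [lo, hi)
def pvSum (f : Nat → Int) (lo hi : Nat) : Int :=
  if lo < hi then f lo + pvSum f (lo + 1) hi else 0
  termination_by hi - lo

lemma pvSum_congr (f g : Nat → Int) (lo hi : Nat)
    (h : ∀ k, lo ≤ k → k < hi → f k = g k) : pvSum f lo hi = pvSum g lo hi := by
  induction hn : hi - lo generalizing lo with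
  | zero =>
    conv_lhs => rw [pvSum]
    conv_rhs => rw [pvSum]
    simp only [if_neg (by omega : ¬ lo < hi)]
  | succ n ih =>
    conv_lhs => rw [pvSum]
    conv_rhs => rw [pvSum]
    have hlt : lo < hi := by omega
    simp only [if_pos hlt]
    rw [h lo le_rfl hlt, ih (lo + 1) (fun k hk1 hk2 => h k (by omega) hk2) (by omega)]

-- A's inner fold over range(1, min(9, len(word)+1)) as the interval sum pvSum
lemma pvFoldA_aux (tree : PvTrie) (word : List Int) (f : Nat)
    (lonat : Nat) (acc : Int) :
    (PySem.List.pyRange (lonat : Int) (min 9 ((word.length : Int) + 1)) 1).foldl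
      (fun mtc n =>
        if pvInTree tree (word.take n.toNat) then mtc + pvCountF f tree (word.drop n.toNat)
        else mtc) acc
    = acc + pvSum (fun n => if pvInTree tree (word.take n) then pvCountF f tree (word.drop n) else 0)
        lonat (min 9 (word.length + 1)) := by
  have hb : (min 9 ((word.length : Int) + 1)) = ((min 9 (word.length + 1) : Nat) : Int) := by
    push_cast
    omega
  induction hn : min 9 (word.length + 1) - lonat generalizing lonat acc with
  | zero =>
    rw [hb, PySem.List.pyRange_one_eq_nil
      (by exact_mod_cast (by omega : min 9 (word.length + 1) ≤ lonat))]
    conv_rhs => rw [pvSum]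
    simp only [List.foldl_nil, if_neg (by omega : ¬ lonat < min 9 (word.length + 1))]
    ring
  | succ n ih =>
    have hlt : lonat < min 9 (word.length + 1) := by omega
    rw [hb, PySem.List.pyRange_one_cons (by exact_mod_cast hlt)]
    simp only [List.foldl_cons, Int.toNat_natCast]
    rw [show ((lonat : Int) + 1) = ((lonat + 1 : Nat) : Int) from by push_cast; ring, ← hb,
      ih (lonat + 1) _ (by omega)]
    conv_rhs => rw [pvSum]
    simp only [if_pos hlt]
    split_ifs <;> ring

lemma pvFoldA_eq (tree : PvTrie) (word : List Int) (f : Nat) :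
    (PySem.List.pyRange 1 (min 9 ((word.length : Int) + 1)) 1).foldl
      (fun mtc n =>
        if pvInTree tree (word.take n.toNat) then mtc + pvCountF f tree (word.drop n.toNat)
        else mtc) 0
    = pvSum (fun n => if pvInTree tree (word.take n) then pvCountF f tree (word.drop n) else 0)
        1 (min 9 (word.length + 1)) := by
  have h := pvFoldA_aux tree word f 1 0
  simpa using h

-- any fuel ≥ len(word) computes the same value as fuel = len(word)
lemma pvCountF_fuel (tree : PvTrie) : ∀ (len : Nat) (word : List Int), word.length = len →
    ∀ f, len ≤ f → pvCountF f tree word = pvCountF len tree word := by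
  intro len
  induction len using Nat.strong_induction_on with
  | _ len ih =>
    intro word hlen f hf
    match len, f with
    | 0, 0 => rfl
    | 0, f + 1 => simp [pvCountF, hlen]
    | l + 1, 0 => exact absurd hf (by omega)
    | l + 1, f + 1 =>
      simp only [pvCountF, hlen, if_neg (Nat.succ_ne_zero l)]
      apply PySem.List.foldl_congr_mem
      intro acc n hn
      rw [PySem.List.mem_pyRange_one] at hn
      have hn1 : 1 ≤ n.toNat := by omega
      have hd : (word.drop n.toNat).length = l + 1 - n.toNat := by simp [hlen]
      rw [ih (word.drop n.toNat).length (by omega) _ rfl f (by omega),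
        ih (word.drop n.toNat).length (by omega) _ rfl l (by omega)]

-- B's inner fold over range(1, min(8, n-i)+1) as the interval sum pvSum
lemma pvFoldB_aux (ts : PySem.Set String) (suffix : List Char) (dps : List Int)
    (lonat : Nat) (acc : Int) :
    (PySem.List.pyRange (lonat : Int) (min 8 ((suffix.length : Int)) + 1) 1).foldl
      (fun acc k => if PySem.Set.contains ts (String.ofList (suffix.take k.toNat))
        then acc + dps.getD (k.toNat - 1) 0 else acc) acc
    = acc + pvSum (fun n => if PySem.Set.contains ts (String.ofList (suffix.take n))
        then dps.getD (n - 1) 0 else 0) lonat (min 8 suffix.length + 1) := by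
  have hb : (min 8 ((suffix.length : Int)) + 1) = ((min 8 suffix.length + 1 : Nat) : Int) := by
    push_cast
    omega
  induction hn : min 8 suffix.length + 1 - lonat generalizing lonat acc with
  | zero =>
    rw [hb, PySem.List.pyRange_one_eq_nil
      (by exact_mod_cast (by omega : min 8 suffix.length + 1 ≤ lonat))]
    conv_rhs => rw [pvSum]
    simp only [List.foldl_nil, if_neg (by omega : ¬ lonat < min 8 suffix.length + 1)]
    ring
  | succ n ih =>
    have hlt : lonat < min 8 suffix.length + 1 := by omega
    rw [hb, PySem.List.pyRange_one_cons (by exact_mod_cast hlt)]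
    simp only [List.foldl_cons, Int.toNat_natCast]
    rw [show ((lonat : Int) + 1) = ((lonat + 1 : Nat) : Int) from by push_cast; ring, ← hb,
      ih (lonat + 1) _ (by omega)]
    conv_rhs => rw [pvSum]
    simp only [if_pos hlt]
    split_ifs <;> ring

lemma pvFoldB_eq (ts : PySem.Set String) (suffix : List Char) (dps : List Int) :
    (PySem.List.pyRange 1 (min 8 ((suffix.length : Int)) + 1) 1).foldl
      (fun acc k => if PySem.Set.contains ts (String.ofList (suffix.take k.toNat))
        then acc + dps.getD (k.toNat - 1) 0 else acc) 0
    = pvSum (fun n => if PySem.Set.contains ts (String.ofList (suffix.take n))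
        then dps.getD (n - 1) 0 else 0) 1 (min 8 suffix.length + 1) := by
  have h := pvFoldB_aux ts suffix dps 1 0
  simpa using h

def pvCodesL (l : List Char) : List Int := l.map (fun c => (c.toNat : Int))

lemma pvCodesL_inj : Function.Injective pvCodesL := by
  apply List.map_injective_iff.mpr
  intro a b hab
  simp only at hab
  have h1 : a.toNat = b.toNat := by exact_mod_cast hab
  exact Char.ext (UInt32.toNat_inj.mp h1)

lemma pvCodesPos (s : String) (hs : pvDomStr s = true) : ∀ x ∈ pvCodesL s.toList, 0 < x := by
  intro x hx
  simp only [pvCodesL, List.mem_map] at hx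
  obtain ⟨c, hc, rfl⟩ := hx
  simp only [pvDomStr, List.all_eq_true] at hs
  have := hs c hc
  simp only [pvDomChar, Bool.or_eq_true, Bool.and_eq_true, decide_eq_true_eq, beq_iff_eq] at this
  omega

-- the membership test both programs make for a candidate pre of length k ≤ 8
lemma pvMember_iff (towels : List String) (pre : List Char)
    (hdom : towels.all (fun t => pvDomStr t) = true)
    (hpre : ∀ c ∈ pre, pvDomChar c = true) (hlen : pre.length ≤ 8) :
    pvInTree (pvTowelTree towels) (pvCodesL pre)
      = PySem.Set.contains (PySem.Set.ofList (towels.filter (fun t => decide (PySem.Str.len t ≤ 8))))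
          (String.ofList pre) := by
  simp only [List.all_eq_true] at hdom
  rw [pvInTree_towelTree towels _
    (fun t ht => by
      have : pvCodes t = pvCodesL t.toList := rfl
      rw [this]; exact pvCodesPos t (hdom t ht))
    (by
      intro x hx
      simp only [pvCodesL, List.mem_map] at hx
      obtain ⟨c, hc, rfl⟩ := hx
      have := hpre c hc
      simp only [pvDomChar, Bool.or_eq_true, Bool.and_eq_true, decide_eq_true_eq, beq_iff_eq] at this
      omega)]
  rw [PySem.Set.contains_eq_listContains, Bool.eq_iff_iff]
  simp only [decide_eq_true_eq, List.contains_iff_mem, PySem.Set.mem_ofList, List.mem_filter,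
    List.mem_map, decide_eq_true_eq]
  constructor
  · rintro ⟨t, ht, heq⟩
    have hteq : t = String.ofList pre := by
      have : pvCodesL t.toList = pvCodesL pre := heq
      have h2 : t.toList = pre := pvCodesL_inj this
      rw [← h2, String.ofList_toList]
    refine ⟨hteq ▸ ht, ?_⟩
    rw [PySem.Str.len_eq]
    simp only [String.toList_ofList]
    exact_mod_cast hlen
  · rintro ⟨hmem, _⟩
    exact ⟨String.ofList pre, hmem, by simp [pvCodes, pvCodesL, String.toList_ofList]⟩

-- the DP list of B holds exactly A's counts over the suffixes of the pattern
lemma pvDpB_eq (towels : List String) (hdom : towels.all (fun t => pvDomStr t) = true)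
    (l : List Char) (hl : ∀ c ∈ l, pvDomChar c = true) :
    pvDpB (PySem.Set.ofList (towels.filter (fun t => decide (PySem.Str.len t ≤ 8)))) l
      = (List.range (l.length + 1)).map
          (fun i => pvCountF (pvCodesL (l.drop i)).length (pvTowelTree towels) (pvCodesL (l.drop i))) := by
  induction l with
  | nil =>
    simp only [pvDpB, List.length_nil, List.drop_nil]
    simp [pvCountF, pvCodesL]
  | cons c rest ih =>
    have hrest : ∀ x ∈ rest, pvDomChar x = true := fun x hx => hl x (by simp [hx])
    have ihr := ih hrest
    rw [show pvDpB (PySem.Set.ofList (towels.filter (fun t => decide (PySem.Str.len t ≤ 8)))) (c :: rest)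
        = ((PySem.List.pyRange 1 (min 8 ((((c :: rest).length : Int))) + 1) 1).foldl
            (fun acc k =>
              if PySem.Set.contains (PySem.Set.ofList (towels.filter (fun t => decide (PySem.Str.len t ≤ 8))))
                  (String.ofList ((c :: rest).take k.toNat))
              then acc + (pvDpB (PySem.Set.ofList (towels.filter (fun t => decide (PySem.Str.len t ≤ 8)))) rest).getD (k.toNat - 1) 0 else acc) 0)
          :: pvDpB (PySem.Set.ofList (towels.filter (fun t => decide (PySem.Str.len t ≤ 8)))) rest from rfl]
    rw [show (c :: rest).length + 1 = rest.length + 1 + 1 from by simp]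
    rw [List.range_succ_eq_map, List.map_cons, List.map_map]
    have htail : (List.range (rest.length + 1)).map
        ((fun i => pvCountF (pvCodesL ((c :: rest).drop i)).length (pvTowelTree towels) (pvCodesL ((c :: rest).drop i))) ∘ Nat.succ)
        = (List.range (rest.length + 1)).map
            (fun i => pvCountF (pvCodesL (rest.drop i)).length (pvTowelTree towels) (pvCodesL (rest.drop i))) := by
      apply List.map_congr_left
      intro i _
      simp [Function.comp]
    rw [htail, ← ihr, List.drop_zero]
    congr 1
    -- head: B's inner fold value = A's count on the full suffix
    rw [pvFoldB_eq]
    have hlen : (pvCodesL (c :: rest)).length = rest.length + 1 := by simp [pvCodesL]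
    rw [hlen]
    simp only [pvCountF, if_neg (show ¬ ((pvCodesL (c :: rest)).length = 0) by omega)]
    rw [pvFoldA_eq]
    have hrange : min 9 ((pvCodesL (c :: rest)).length + 1) = min 8 (c :: rest).length + 1 := by
      simp only [hlen, List.length_cons]; omega
    rw [hrange]
    apply pvSum_congr
    intro k hk1 hk2
    have hk8 : k ≤ 8 := by omega
    have hkle : k ≤ rest.length + 1 := by simp only [List.length_cons] at hk2; omega
    have htake : (pvCodesL (c :: rest)).take k = pvCodesL ((c :: rest).take k) := by
      simp [pvCodesL, List.map_take]
    have hdrop : (pvCodesL (c :: rest)).drop k = pvCodesL ((c :: rest).drop k) := by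
      simp [pvCodesL, List.map_drop]
    rw [htake, hdrop, pvMember_iff towels _ hdom
      (fun x hx => hl x (List.take_subset k _ hx))
      (by simp only [List.length_take, List.length_cons]; omega)]
    congr 1
    -- the dp entry at k-1 is A's count on the suffix dropped by k
    rw [ihr]
    have hk1' : k - 1 < rest.length + 1 := by omega
    rw [List.getD_eq_getElem?_getD, List.getElem?_map, List.getElem?_range hk1']
    simp only [Option.map_some, Option.getD_some]
    rw [show (c :: rest).drop k = rest.drop (k - 1) from by
      cases k with
      | zero => omega
      | succ k' => simp]
    rw [pvCountF_fuel (pvTowelTree towels) (pvCodesL (rest.drop (k - 1))).length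
      (pvCodesL (rest.drop (k - 1))) rfl rest.length (by simp [pvCodesL])]

lemma pvEnum_fold (tree : PvTrie) (C : String → Int)
    (l : List String) (h : ∀ p ∈ l, pvCountF (pvCodes p).length tree (pvCodes p) = C p) :
    ∀ (s : Int) (init : Int),
      (PySem.List.enumerate l s).foldl
          (fun mtc ip => mtc + pvCountF (pvCodes ip.2).length tree (pvCodes ip.2)) init
        = l.foldl (fun total p => total + C p) init := by
  induction l with
  | nil => intro s init; simp [PySem.List.enumerate_nil]
  | cons p rest ih =>
    intro s init
    rw [PySem.List.enumerate_cons]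
    simp only [List.foldl_cons]
    rw [h p (by simp), ih (fun q hq => h q (by simp [hq]))]

-- ===== VERDICT (by name: the statement is the Claim_ definition above) =====
theorem fn_2c_spec : Claim_equal_fn_2c := by
  intro towels patterns hdom
  unfold Spec_fn_2c fn_2c fn_2c_alt
  simp only [Dom_fn_2c, Bool.and_eq_true] at hdom
  obtain ⟨ht, hp⟩ := hdom
  apply pvEnum_fold _
    (fun p => (pvDpB (PySem.Set.ofList (towels.filter (fun t => decide (PySem.Str.len t ≤ 8)))) p.toList).headD 0)
  intro p hpmem
  have hpd : pvDomStr p = true := by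
    simp only [List.all_eq_true] at hp
    exact hp p hpmem
  have hchars : ∀ c ∈ p.toList, pvDomChar c = true := by
    simpa [pvDomStr, List.all_eq_true] using hpd
  rw [pvDpB_eq towels ht p.toList hchars]
  have hcp : pvCodes p = pvCodesL p.toList := rfl
  rw [hcp]
  rw [List.range_succ_eq_map]
  simp
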